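-- pv_equiv track=rewrite | github.com/ls-fuckbug/travel_recommendation | load_routes.py | spot_mat
-- ===== SOURCE A (Python) =====
-- def spot_mat(spots,routes):
--     spot_dic={}                      #景点名和位置的映射
--     n=0
--     for s in spots:
--         spot_dic[s]=n
--         n=n+1
--
--     order_mat=[]                       #景点先后矩阵   order_mat[i][j] 表示i景点之后去j景点有多少次
--     for i in range(n):
--         order_mat.append([])
--         for j in range(n):
--             order_mat[i].append(0)
--
--     for r in routes:
--         for i in range( len(r)-1 ):
--             if(r[i] in spot_dic and r[i+1] in spot_dic ):
--                 order_mat[ spot_dic[r[i]] ][spot_dic[r[i+1]]]+=1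
--
--     return spot_dic,order_mat
-- ===== SOURCE B (Python) =====
-- def spot_mat(spots, routes):
--     spot_dic = {s: i for i, s in enumerate(spots)}
--     n = len(spots)
--     # extract the flat list of index pairs of all valid consecutive transitions
--     trans = [(spot_dic[a], spot_dic[b])
--              for r in routes for a, b in zip(r, r[1:])
--              if a in spot_dic and b in spot_dic]
--     # build each cell by counting its pair in that list
--     order_mat = [[trans.count((i, j)) for j in range(n)] for i in range(n)]
--     return spot_dic, order_mat
-- ===== Notes on version B (the rewrite author's own statement) =====
-- stated objective: alternative
-- what changed: B never builds or increments a zero matrix: it first extracts the flat list of transition index pairs from all routes, then constructs each matrix cell (i,j) independently by counting occurrences of (i,j) in that list.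
import Mathlib
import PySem

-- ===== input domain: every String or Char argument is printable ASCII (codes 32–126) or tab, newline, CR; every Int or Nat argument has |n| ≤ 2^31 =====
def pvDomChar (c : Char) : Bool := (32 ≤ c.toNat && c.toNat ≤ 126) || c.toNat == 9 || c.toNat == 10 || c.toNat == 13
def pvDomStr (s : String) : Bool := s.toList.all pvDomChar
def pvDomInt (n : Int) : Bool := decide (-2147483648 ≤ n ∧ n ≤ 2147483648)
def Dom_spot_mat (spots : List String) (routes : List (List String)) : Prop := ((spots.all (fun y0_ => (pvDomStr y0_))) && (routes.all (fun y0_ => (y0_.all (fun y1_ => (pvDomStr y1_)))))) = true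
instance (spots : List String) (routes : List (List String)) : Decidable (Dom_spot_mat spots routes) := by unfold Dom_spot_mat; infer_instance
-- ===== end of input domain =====

-- B never builds or increments a zero matrix: it extracts the flat list of transition index
-- pairs and then constructs each matrix cell independently by counting (objective: alternative).

-- ===== PORT A =====
-- order_mat[spot_dic[r[i]]][spot_dic[r[i+1]]] += 1 ; exact here: the two indices are dict
-- values, i.e. nonnegative list positions, so Python never wraps and .toNat never clamps.
def pvIncAt (m : List (List Int)) (i j : Int) : List (List Int) :=
  m.modify i.toNat (fun row => row.modify j.toNat (· + 1))

def spot_mat (spots : List String) (routes : List (List String)) :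
    (List (String × Int)) × List (List Int) :=
  let st := spots.foldl (fun (p : PySem.Dict String Int × Int) s => (p.1.insert s p.2, p.2 + 1))
      (PySem.Dict.empty, 0)
  let dic := st.1
  let n := st.2
  let mat0 := (PySem.List.pyRange 0 n).foldl
      (fun m _ => m ++ [(PySem.List.pyRange 0 n).foldl (fun (row : List Int) _ => row ++ [(0 : Int)]) []]) []
  let mat := routes.foldl (fun m r =>
      (PySem.List.pyRange 0 ((r.length : Int) - 1)).foldl (fun m i =>
        match PySem.List.pyGet? r i, PySem.List.pyGet? r (i + 1) with
        | some a, some b =>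
            if dic.contains a && dic.contains b then
              pvIncAt m (dic.getD a 0) (dic.getD b 0)
            else m
        | _, _ => m) m) mat0
  (dic.items, mat)

-- ===== PORT B =====
def spot_mat_alt (spots : List String) (routes : List (List String)) :
    (List (String × Int)) × List (List Int) :=
  let dic := (PySem.List.enumerate spots).foldl
      (fun (d : PySem.Dict String Int) p => d.insert p.2 p.1) PySem.Dict.empty
  let n : Int := spots.length
  let trans := routes.flatMap (fun r =>
      (r.zip (r.drop 1)).filterMap (fun p =>
        if dic.contains p.1 && dic.contains p.2 then
          some (dic.getD p.1 0, dic.getD p.2 0)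
        else none))
  let mat := (PySem.List.pyRange 0 n).map (fun i =>
      (PySem.List.pyRange 0 n).map (fun j => ((trans.count (i, j) : Nat) : Int)))
  (dic.items, mat)

-- ===== PRECONDITION & SPEC =====
def Spec_spot_mat (spots : List String) (routes : List (List String)) (out : (List (String × Int)) × List (List Int)) : Prop := out = spot_mat_alt spots routes
instance (spots : List String) (routes : List (List String)) (out : (List (String × Int)) × List (List Int)) : Decidable (Spec_spot_mat spots routes out) := by unfold Spec_spot_mat; infer_instance

-- ===== CLAIM (what is proved, stated in full; the proofs are below) =====
def Claim_equal_spot_mat : Prop := ∀ (spots : List String) (routes : List (List String)), Dom_spot_mat spots routes → Spec_spot_mat spots routes (spot_mat spots routes)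

-- ===== LEMMAS AND PROOFS =====

-- the dense matrix whose (i,j) cell counts the pair (i,j) in a flat transition list
def pvDense (n : Int) (ps : List (Int × Int)) : List (List Int) :=
  (PySem.List.pyRange 0 n).map (fun i =>
    (PySem.List.pyRange 0 n).map (fun j => ((ps.count (i, j) : Nat) : Int)))

-- A's dict-building fold equals B's enumerate fold
theorem pv_dict_eq : ∀ (spots : List String) (d : PySem.Dict String Int) (k : Int),
    spots.foldl (fun (p : PySem.Dict String Int × Int) s => (p.1.insert s p.2, p.2 + 1)) (d, k)
      = ((PySem.List.enumerate spots k).foldl (fun d p => d.insert p.2 p.1) d, k + spots.length) := by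
  intro spots
  induction spots with
  | nil => intro d k; simp [PySem.List.enumerate]
  | cons x xs ih =>
      intro d k
      simp only [List.foldl_cons, PySem.List.enumerate, ih]
      simp only [List.length_cons]; push_cast
      exact Prod.ext rfl (by ring)

theorem pv_dict_bounds : ∀ (spots : List String) (k : Int) (d : PySem.Dict String Int) (s : String) (v : Int),
    ((PySem.List.enumerate spots k).foldl (fun d p => d.insert p.2 p.1) d).get? s = some v →
      (k ≤ v ∧ v < k + spots.length) ∨ d.get? s = some v := by
  intro spots
  induction spots with
  | nil => intro k d s v h; simp [PySem.List.enumerate] at h; right; exact h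
  | cons x xs ih =>
      intro k d s v h
      simp only [PySem.List.enumerate, List.foldl_cons] at h
      rcases ih (k+1) (d.insert x k) s v h with h' | h'
      · left; simp only [List.length_cons] at *; push_cast at *; omega
      · by_cases hx : s = x
        · subst hx; rw [PySem.Dict.get?_insert_self] at h'
          obtain rfl := Option.some.inj h'
          left; simp only [List.length_cons]; push_cast; omega
        · right; rwa [PySem.Dict.get?_insert_of_ne _ _ hx] at h'

-- A's pre-zeroed matrix is the count matrix of the empty transition list
theorem pv_mat0_eq (n : Int) :
    (PySem.List.pyRange 0 n).foldl
      (fun m _ => m ++ [(PySem.List.pyRange 0 n).foldl (fun (row : List Int) _ => row ++ [(0 : Int)]) []]) []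
      = pvDense n [] := by
  unfold pvDense
  rw [PySem.List.foldl_append_singleton_eq_map (fun _ => (PySem.List.pyRange 0 n).foldl (fun (row : List Int) _ => row ++ [(0 : Int)]) [])]
  simp [PySem.List.foldl_append_singleton_eq_map (fun _ => (0:Int))]

-- A's index loop over a route visits exactly the adjacent pairs
theorem pv_pair_fold {β : Type} (g : β → String → String → β) :
    ∀ (r : List String) (m : β),
    (PySem.List.pyRange 0 ((r.length : Int) - 1)).foldl (fun m i =>
        match PySem.List.pyGet? r i, PySem.List.pyGet? r (i + 1) with
        | some a, some b => g m a b
        | _, _ => m) m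
      = (r.zip (r.drop 1)).foldl (fun m p => g m p.1 p.2) m := by
  intro r
  induction r with
  | nil => intro m; simp [PySem.List.pyRange]
  | cons a t ih =>
      cases t with
      | nil => intro m; simp [PySem.List.pyRange]
      | cons b t' =>
          intro m
          have hlen : ((a :: b :: t').length : Int) - 1 = ((t'.length + 1 : Nat) : Int) := by
            simp only [List.length_cons]; push_cast; ring
          rw [hlen, PySem.List.pyRange_zero_natCast, List.range_succ_eq_map]
          simp only [List.map_cons, List.foldl_cons, List.map_map, List.foldl_map]
          have h0 : PySem.List.pyGet? (a :: b :: t') ((0:Nat):Int) = some a := by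
            simp
          have h1 : PySem.List.pyGet? (a :: b :: t') (((0:Nat):Int) + 1) = some b := by
            norm_num
          have hz : (b :: t').zip (List.drop 1 (b :: t')) = (b :: t').zip t' := by simp
          have hrs : (a :: b :: t').zip (List.drop 1 (a :: b :: t')) = (a, b) :: (b :: t').zip t' := by simp
          rw [hrs, List.foldl_cons]
          have hm : (match PySem.List.pyGet? (a :: b :: t') (((0:Nat):Int)), PySem.List.pyGet? (a :: b :: t') (((0:Nat):Int) + 1) with
              | some x, some y => g m x y | _, _ => m) = g m a b := by rw [h0, h1]
          rw [hm]
          have hih := ih (g m a b)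
          have hlen' : ((b :: t').length : Int) - 1 = ((t'.length : Nat) : Int) := by
            simp only [List.length_cons]; push_cast; ring
          rw [hlen', PySem.List.pyRange_zero_natCast, List.foldl_map, hz] at hih
          rw [← hih]
          apply PySem.List.foldl_congr_mem
          intro acc i _
          have e1 : PySem.List.pyGet? (a :: b :: t') (((i+1 : Nat) : Int)) = PySem.List.pyGet? (b :: t') ((i : Nat) : Int) := by
            simp [PySem.List.pyGet?_natCast]
          have e2 : PySem.List.pyGet? (a :: b :: t') ((((i+1) : Nat) : Int) + 1) = PySem.List.pyGet? (b :: t') (((i : Nat) : Int) + 1) := by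
            have c1 : (((i+1 : Nat) : Int) + 1) = ((i+2 : Nat) : Int) := by push_cast; ring
            have c2 : (((i : Nat) : Int) + 1) = ((i+1 : Nat) : Int) := by push_cast; ring
            rw [c1, c2, PySem.List.pyGet?_natCast, PySem.List.pyGet?_natCast]; simp
          show (match PySem.List.pyGet? (a :: b :: t') ((((i+1):Nat):Int)), PySem.List.pyGet? (a :: b :: t') ((((i+1):Nat):Int) + 1) with
              | some x, some y => g acc x y | _, _ => acc) = _
          rw [e1, e2]

-- incrementing one in-range cell of a count matrix = appending that pair to the flat list
theorem pv_inc_dense (n i j : Int) (ps : List (Int × Int))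
    (hi : 0 ≤ i ∧ i < n) (hj : 0 ≤ j ∧ j < n) :
    pvIncAt (pvDense n ps) i j = pvDense n (ps ++ [(i, j)]) := by
  have hn : n = ((n.toNat : Nat) : Int) := by omega
  unfold pvIncAt pvDense
  rw [hn, PySem.List.pyRange_zero_natCast]
  simp only [List.map_map]
  apply List.ext_getElem
  · simp [List.length_modify]
  · intro a h1 h2
    simp only [List.length_modify, List.length_map, List.length_range] at h1 h2
    rw [List.getElem_modify]
    simp only [List.getElem_map, List.getElem_range, Function.comp]
    by_cases ha : i.toNat = a
    · simp only [if_pos ha]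
      apply List.ext_getElem
      · simp [List.length_modify]
      · intro l hl1 hl2
        simp only [List.length_modify, List.length_map, List.length_range] at hl1 hl2
        rw [List.getElem_modify]
        simp only [List.getElem_map, List.getElem_range]
        simp only [Function.comp_apply, List.count_append]
        by_cases hlj : j.toNat = l
        · have hp : ((i, j) : Int × Int) = ((a : Int), (l : Int)) := by
            rw [Prod.mk.injEq]; exact ⟨by omega, by omega⟩
          rw [if_pos hlj]
          rw [show [(i, j)].count ((a : Int), (l : Int)) = 1 from by simp [hp]]
          push_cast; ring
        · have hp : ¬(((i, j) : Int × Int) = ((a : Int), (l : Int))) := by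
            rw [Prod.mk.injEq]; intro h; exact hlj (by omega)
          rw [if_neg hlj]
          rw [show [(i, j)].count ((a : Int), (l : Int)) = 0 from by simp [hp]]
          simp
    · simp only [if_neg ha]
      apply List.map_congr_left
      intro l _
      simp only [Function.comp_apply, List.count_append]
      have hp : ¬(((i, j) : Int × Int) = ((a : Int), (l : Int))) := by
        rw [Prod.mk.injEq]; intro h; exact ha (by omega)
      rw [show [(i, j)].count ((a : Int), (l : Int)) = 0 from by simp [hp]]
      simp

-- A's guarded increments over a pair list = appending B's filterMap of that pair list
theorem pv_route_fold (dic : PySem.Dict String Int) (n : Int)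
    (hb : ∀ s v, dic.get? s = some v → 0 ≤ v ∧ v < n) :
    ∀ (prs : List (String × String)) (ps : List (Int × Int)),
    prs.foldl (fun m p =>
        if dic.contains p.1 && dic.contains p.2 then
          pvIncAt m (dic.getD p.1 0) (dic.getD p.2 0)
        else m) (pvDense n ps)
      = pvDense n (ps ++ prs.filterMap (fun p =>
          if dic.contains p.1 && dic.contains p.2 then
            some (dic.getD p.1 0, dic.getD p.2 0)
          else none)) := by
  intro prs
  induction prs with
  | nil => intro ps; simp
  | cons p t ih =>
      intro ps
      simp only [List.foldl_cons, List.filterMap_cons]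
      rcases hg1 : dic.get? p.1 with _ | i <;> rcases hg2 : dic.get? p.2 with _ | j
      case none.none | none.some | some.none =>
        rw [if_neg (by simp [PySem.Dict.contains_eq_isSome_get?, hg1, hg2])]
        rw [show (if dic.contains p.1 && dic.contains p.2 then
            some (dic.getD p.1 0, dic.getD p.2 0) else none) = none from by
          rw [if_neg (by simp [PySem.Dict.contains_eq_isSome_get?, hg1, hg2])]]
        exact ih ps
      case some.some =>
        have hc : (dic.contains p.1 && dic.contains p.2) = true := by
          simp [PySem.Dict.contains_eq_isSome_get?, hg1, hg2]
        rw [if_pos hc,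
          show dic.getD p.1 0 = i from by simp [PySem.Dict.getD, hg1],
          show dic.getD p.2 0 = j from by simp [PySem.Dict.getD, hg2],
          pv_inc_dense n i j ps (hb _ _ hg1) (hb _ _ hg2)]
        simp only [hc, if_true]
        rw [ih (ps ++ [(i, j)])]
        simp
-- the count invariant lifted over the whole routes list
theorem pv_routes_fold (dic : PySem.Dict String Int) (n : Int)
    (hb : ∀ s v, dic.get? s = some v → 0 ≤ v ∧ v < n) :
    ∀ (routes : List (List String)) (ps : List (Int × Int)),
    routes.foldl (fun m r =>
        (PySem.List.pyRange 0 ((r.length : Int) - 1)).foldl (fun m i =>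
          match PySem.List.pyGet? r i, PySem.List.pyGet? r (i + 1) with
          | some a, some b =>
              if dic.contains a && dic.contains b then
                pvIncAt m (dic.getD a 0) (dic.getD b 0)
              else m
          | _, _ => m) m) (pvDense n ps)
      = pvDense n (ps ++ routes.flatMap (fun r =>
          (r.zip (r.drop 1)).filterMap (fun p =>
            if dic.contains p.1 && dic.contains p.2 then
              some (dic.getD p.1 0, dic.getD p.2 0)
            else none))) := by
  intro routes
  induction routes with
  | nil => intro ps; simp
  | cons r t ih =>
      intro ps
      simp only [List.foldl_cons, List.flatMap_cons]
      rw [pv_pair_fold (fun m a b =>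
            if dic.contains a && dic.contains b then
              pvIncAt m (dic.getD a 0) (dic.getD b 0)
            else m) r,
          pv_route_fold dic n hb (r.zip (r.drop 1)) ps,
          ih]
      simp

-- ===== VERDICT (by name: the statement is the Claim_ definition above) =====
theorem spot_mat_spec : Claim_equal_spot_mat := by
  unfold Claim_equal_spot_mat Spec_spot_mat
  intro spots routes _
  unfold spot_mat spot_mat_alt
  rw [pv_dict_eq spots PySem.Dict.empty 0]
  simp only [zero_add]
  have hb : ∀ s v,
      ((PySem.List.enumerate spots 0).foldl (fun d p => d.insert p.2 p.1) PySem.Dict.empty).get? s = some v →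
        0 ≤ v ∧ v < (spots.length : Int) := by
    intro s v h
    rcases pv_dict_bounds spots 0 PySem.Dict.empty s v h with h' | h'
    · omega
    · rw [PySem.Dict.get?_empty] at h'; cases h'
  rw [pv_mat0_eq, pv_routes_fold _ _ hb routes []]
  rfl
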